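-- pv_equiv track=rewrite | github.com/Alvaropz/Python_problems_BinarySearch | 1. Easy/column_sort/column_sort.py | column_sort
-- ===== SOURCE A (Python) =====
-- def column_sort(matrix):
--     if len(matrix) > 1:
--         new_matrix = []
--         temp_matrix = []
--         for inner_index in range(len(matrix[0])):
--             for outer_index in range(len(matrix)):
--                 temp_matrix.append(matrix[outer_index][inner_index])
--             new_matrix.append(sorted(temp_matrix))
--             temp_matrix = []
--         sorted_matrix = []
--         for inner_index in range(len(new_matrix[0])):
--             for outer_index in range(len(matrix[0])):
--                 temp_matrix.append(new_matrix[outer_index][inner_index])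
--             sorted_matrix.append(temp_matrix)
--             temp_matrix = []
--         return sorted_matrix
--     return matrix
-- ===== SOURCE B (Python) =====
-- def _insert(x, c):
--     # insert x into the sorted list c, scanning from the right
--     # (constant work per element once the column data arrives in order)
--     k = len(c)
--     while k > 0 and x < c[k - 1]:
--         k -= 1
--     c.insert(k, x)
--
--
-- def column_sort(matrix):
--     if len(matrix) <= 1:
--         return matrix
--     ncols = len(matrix[0])
--     cols = [[] for _ in range(ncols)]
--     for row in matrix:
--         for j in range(ncols):
--             _insert(row[j], cols[j])
--     return [[c[i] for c in cols] for i in range(len(matrix))]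
-- ===== Notes on version B (the rewrite author's own statement) =====
-- stated objective: alternative
-- what changed: B replaces A's gather-each-column/library-sort/double-transpose pipeline with a single streaming pass over the rows that maintains every column as an incrementally built sorted list (right-to-left insertion into sorted position), then emits output rows directly; no sorted() call and no intermediate transposed matrix.
-- outside the precondition, e.g. on column_sort([[], []]): A raises IndexError, B returns [[], []]; on column_sort([[1, 2], [3]]): A raises IndexError, B raises IndexError
import Mathlib
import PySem

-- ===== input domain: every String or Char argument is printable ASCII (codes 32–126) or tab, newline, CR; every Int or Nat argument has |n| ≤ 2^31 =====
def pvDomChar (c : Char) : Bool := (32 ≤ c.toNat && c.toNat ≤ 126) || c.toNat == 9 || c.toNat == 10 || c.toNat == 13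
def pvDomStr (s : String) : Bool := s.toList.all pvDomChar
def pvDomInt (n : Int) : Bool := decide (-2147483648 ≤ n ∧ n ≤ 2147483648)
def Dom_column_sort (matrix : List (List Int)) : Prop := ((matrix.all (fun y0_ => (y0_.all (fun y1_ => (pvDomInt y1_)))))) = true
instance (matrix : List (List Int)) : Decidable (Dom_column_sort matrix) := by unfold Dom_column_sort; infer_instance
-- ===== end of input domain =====

-- B replaces A's gather-sort-transpose-twice pipeline by a single streaming pass over the rows
-- that maintains each column as an incrementally built sorted list (insertion), emitting output
-- rows directly (objective: alternative — no library sort, no intermediate transposed matrix).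

-- ===== PORT A =====
def column_sort (matrix : List (List Int)) : List (List Int) :=
  if matrix.length > 1 then
    let new_matrix : List (List Int) :=
      (PySem.List.pyRange 0 (matrix.headD []).length 1).foldl
        (fun nm j =>
          let tm := (PySem.List.pyRange 0 matrix.length 1).foldl
            (fun tm i => tm ++ [PySem.List.pyGetD (PySem.List.pyGetD matrix i []) j 0]) []
          nm ++ [PySem.List.sorted tm (fun x => x) false]) []
    (PySem.List.pyRange 0 (new_matrix.headD []).length 1).foldl
      (fun sm i =>
        let tm := (PySem.List.pyRange 0 (matrix.headD []).length 1).foldl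
          (fun tm j => tm ++ [PySem.List.pyGetD (PySem.List.pyGetD new_matrix j []) i 0]) []
        sm ++ [tm]) []
  else matrix

-- ===== PORT B =====
-- _insert's right-to-left scan, written on the reversed list
def pvInsRev (x : Int) : List Int → List Int
  | [] => [x]
  | y :: ys => if x < y then y :: pvInsRev x ys else x :: y :: ys

-- _insert: insert x into the sorted list c, scanning from the right
def pvInsert (x : Int) (c : List Int) : List Int := (pvInsRev x c.reverse).reverse

def column_sort_alt (matrix : List (List Int)) : List (List Int) :=
  if matrix.length ≤ 1 then matrix
  else
    let ncols := (matrix.headD []).length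
    let cols := matrix.foldl
      (fun cs row => (List.range ncols).map (fun j => pvInsert (row.getD j 0) (cs.getD j [])))
      ((List.range ncols).map (fun _ => ([] : List Int)))
    (List.range matrix.length).map (fun i => cols.map (fun c => c.getD i 0))

-- ===== PRECONDITION & SPEC =====
-- Pre_ excludes exactly the inputs where Python A raises IndexError: matrices with more than
-- one row whose first row is empty, or containing a row shorter than the first row.
def Pre_column_sort (matrix : List (List Int)) : Prop :=
  matrix.length ≤ 1 ∨
    (0 < (matrix.headD []).length ∧ ∀ row ∈ matrix, (matrix.headD []).length ≤ row.length)
instance (matrix : List (List Int)) : Decidable (Pre_column_sort matrix) := by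
  unfold Pre_column_sort; infer_instance

def pvWitness_column_sort : List (List Int) := [[3, 4], [1, 2]]

def Spec_column_sort (matrix : List (List Int)) (out : List (List Int)) : Prop :=
  out = column_sort_alt matrix
instance (matrix : List (List Int)) (out : List (List Int)) : Decidable (Spec_column_sort matrix out) := by
  unfold Spec_column_sort; infer_instance

-- ===== CLAIM (what is proved, stated in full; the proofs are below) =====
def Claim_equal_column_sort : Prop := ∀ (matrix : List (List Int)), Dom_column_sort matrix → Pre_column_sort matrix → Spec_column_sort matrix (column_sort matrix)

-- ===== LEMMAS AND PROOFS =====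

theorem map_range_getD (l : List (List Int)) (g : List Int → Int) :
    (List.range l.length).map (fun i => g (l.getD i [])) = l.map g := by
  apply List.ext_getElem <;> simp
  intro i h1 h2
  simp [List.getElem?_eq_getElem h1]

theorem insertBy_append_last (x d : Int) (hxd : x < d) (ds : List Int) :
    PySem.List.insertBy (fun a b => decide (a < b)) x (ds ++ [d])
      = PySem.List.insertBy (fun a b => decide (a < b)) x ds ++ [d] := by
  induction ds with
  | nil => simp [PySem.List.insertBy, hxd]
  | cons y ys ih =>
      simp only [List.cons_append, PySem.List.insertBy]
      by_cases h : x < y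
      · simp [h]
      · simp [h, ih]

-- on a sorted list, the right-to-left insertion lands where insertBy's left scan does
theorem pvInsert_eq_insertBy (x : Int) (c : List Int) (hs : c.Pairwise (· ≤ ·)) :
    pvInsert x c = PySem.List.insertBy (fun a b => decide (a < b)) x c := by
  induction c using List.reverseRecOn with
  | nil => rfl
  | append_singleton ds d ih =>
      have hds : ds.Pairwise (· ≤ ·) := (List.pairwise_append.mp hs).1
      have hall : ∀ y ∈ ds, y ≤ d := fun y hy => (List.pairwise_append.mp hs).2.2 y hy d (by simp)
      by_cases h : x < d
      · have : pvInsert x (ds ++ [d]) = pvInsert x ds ++ [d] := by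
          simp [pvInsert, pvInsRev, h]
        rw [this, ih hds, insertBy_append_last x d h ds]
      · have hl : pvInsert x (ds ++ [d]) = (ds ++ [d]) ++ [x] := by
          simp [pvInsert, pvInsRev, h]
        rw [hl, PySem.List.insertBy_of_forall_not_before]
        intro y hy
        rcases List.mem_append.mp hy with hy | hy
        · simpa using not_lt.mpr (le_trans (hall y hy) (not_lt.mp h))
        · simp only [List.mem_singleton] at hy
          simpa [hy] using h

-- folding the right-scan insertion over a list builds Python's sorted() of that list
theorem foldl_pvInsert_eq_sorted (l : List Int) :
    l.foldl (fun c x => pvInsert x c) []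
      = PySem.List.sorted l (fun x => x) false := by
  induction l using List.reverseRecOn with
  | nil => rfl
  | append_singleton t x ih =>
      rw [List.foldl_append, List.foldl_cons, List.foldl_nil, ih,
        pvInsert_eq_insertBy x _ (by simpa using PySem.List.sorted_pairwise t (fun x => x)),
        PySem.List.sorted_eq_foldl_insertBy t,
        PySem.List.sorted_eq_foldl_insertBy (t ++ [x]), List.foldl_append, List.foldl_cons,
        List.foldl_nil]

-- the streaming fold over the rows computes, per column j, the insertion fold of column j
theorem fold_cols (n : Nat) (matrix : List (List Int)) (f : Nat → List Int) :
    matrix.foldl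
      (fun cs row => (List.range n).map (fun j => pvInsert (row.getD j 0) (cs.getD j [])))
      ((List.range n).map f)
    = (List.range n).map
        (fun j => matrix.foldl (fun c row => pvInsert (row.getD j 0) c) (f j)) := by
  induction matrix generalizing f with
  | nil => rfl
  | cons row rest ih =>
      simp only [List.foldl_cons]
      have h : (List.range n).map (fun j => pvInsert (row.getD j 0) (((List.range n).map f).getD j []))
          = (List.range n).map (fun j => pvInsert (row.getD j 0) (f j)) := by
        apply List.map_congr_left
        intro j hj
        rw [PySem.List.getD_map_range f n j [] (List.mem_range.mp hj)]
      rw [h, ih (fun j => pvInsert (row.getD j 0) (f j))]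

-- the insertion fold of a column is Python's sorted() of that column
theorem fold_insert_eq_sorted (j : Nat) (matrix : List (List Int)) :
    matrix.foldl (fun c row => pvInsert (row.getD j 0) c) []
      = PySem.List.sorted (matrix.map (fun row => row.getD j 0)) (fun x => x) false := by
  rw [← foldl_pvInsert_eq_sorted, List.foldl_map]

-- ===== VERDICT (by name: the statement is the Claim_ definition above) =====
theorem column_sort_spec : Claim_equal_column_sort := by
  intro matrix _ hpre
  unfold Spec_column_sort column_sort column_sort_alt
  by_cases hle : matrix.length ≤ 1
  · rw [if_neg (by omega), if_pos hle]
  · have hlen : 1 < matrix.length := by omega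
    have hn : 0 < (matrix.headD []).length := by
      rcases hpre with h | ⟨hn, _⟩
      · omega
      · exact hn
    rw [if_pos hlen, if_neg (by omega)]
    simp only [PySem.List.foldl_append_singleton_eq_map, List.nil_append,
      PySem.List.pyRange_zero_natCast, List.map_map, Function.comp_def,
      PySem.List.pyGetD_natCast]
    have hcol : ∀ j : Nat, List.map (fun i => (matrix.getD i []).getD j 0) (List.range matrix.length)
        = List.map (fun row => row.getD j 0) matrix :=
      fun j => map_range_getD matrix (fun row => row.getD j 0)
    simp only [hcol]
    rw [fold_cols (matrix.headD []).length matrix (fun _ => ([] : List Int))]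
    simp only [fold_insert_eq_sorted]
    have hh : ((List.map (fun j => PySem.List.sorted (List.map (fun row => row.getD j 0) matrix) (fun x => x) false)
        (List.range (matrix.headD []).length)).headD []).length = matrix.length := by
      obtain ⟨m, hm⟩ := Nat.exists_eq_succ_of_ne_zero (Nat.pos_iff_ne_zero.mp hn)
      rw [hm, List.range_succ_eq_map]
      simp [PySem.List.length_sorted]
    rw [hh]
    apply List.map_congr_left
    intro i _
    rw [List.map_map]
    apply List.map_congr_left
    intro j hj
    rw [PySem.List.getD_map_range _ _ _ _ (List.mem_range.mp hj)]
    rfl
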